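-- pv_equiv track=rewrite | github.com/fdtorres1/felix_tools | tools/clickup-cli/src/clickup.py | _expand_repeated
-- ===== SOURCE A (Python) =====
-- from typing import Any, Dict, List, Optional
--
-- def _expand_repeated(vals: Optional[List[str]]) -> Optional[List[str]]:
--     if not vals:
--         return None
--     out: List[str] = []
--     for v in vals:
--         for t in str(v).split(','):
--             t = t.strip()
--             if t:
--                 out.append(t)
--     return out
-- ===== SOURCE B (Python) =====
-- from typing import List, Optional
--
-- def _expand_repeated(vals: Optional[List[str]]) -> Optional[List[str]]:
--     if not vals:
--         return None
--     out: List[str] = []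
--     for v in vals:
--         tok = ''   # current token so far, already left-stripped, never ends in whitespace
--         pend = ''  # whitespace seen after tok, emitted only if more non-space follows
--         for ch in str(v):
--             if ch == ',':
--                 if tok:
--                     out.append(tok)
--                 tok = ''
--                 pend = ''
--             elif ch.isspace():
--                 if tok:
--                     pend += ch
--             else:
--                 tok += pend + ch
--                 pend = ''
--         if tok:
--             out.append(tok)
--     return out
-- ===== Notes on version B (the rewrite author's own statement) =====
-- stated objective: alternative
-- what changed: Replaces A's split/strip/filter pipeline with a single character-level state machine that scans each string once, maintaining a current token and pending-whitespace buffer and emitting tokens at commas and end of string, so no split, strip or intermediate token list is ever built.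
import Mathlib
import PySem

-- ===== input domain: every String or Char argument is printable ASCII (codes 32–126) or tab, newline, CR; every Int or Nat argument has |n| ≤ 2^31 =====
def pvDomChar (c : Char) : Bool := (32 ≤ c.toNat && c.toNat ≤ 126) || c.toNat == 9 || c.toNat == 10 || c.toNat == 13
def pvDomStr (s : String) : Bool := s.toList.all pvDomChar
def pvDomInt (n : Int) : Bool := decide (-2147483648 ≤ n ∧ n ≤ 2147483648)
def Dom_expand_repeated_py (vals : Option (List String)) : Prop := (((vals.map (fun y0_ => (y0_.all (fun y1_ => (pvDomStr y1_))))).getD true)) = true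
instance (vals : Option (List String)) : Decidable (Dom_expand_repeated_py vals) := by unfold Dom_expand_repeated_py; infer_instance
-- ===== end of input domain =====

-- B replaces A's per-element split/strip/filter pipeline with a single character-level state
-- machine: it scans each string once, keeping the current token and the whitespace pending after
-- it, and emits tokens at commas and at end of string (objective: alternative).

-- v.split(',') : separator is the non-empty literal ",", so Python never raises here
def pySplitComma (s : String) : List String :=
  (PySem.Chars.splitOn s.toList [',']).map String.ofList

-- ===== PORT A =====
def expand_repeated_py (vals : Option (List String)) : Option (List String) :=
  match vals with
  | none => none                                  -- 'if not vals' (None case)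
  | some vs =>
    if vs.isEmpty then none                       -- 'if not vals' (empty-list case)
    else
      some (vs.foldl (fun out v =>
        (pySplitComma v).foldl (fun out t =>
          let t' := PySem.Str.strip t
          if t' ≠ "" then out ++ [t'] else out) out) [])

-- ===== PORT B =====
-- one step of B's inner character loop; state = (out, tok, pend), strings as List Char
def tokStep (st : List String × List Char × List Char) (ch : Char) :
    List String × List Char × List Char :=
  let (out, tok, pend) := st
  if ch = ',' then
    ((if tok ≠ [] then out ++ [String.ofList tok] else out), [], [])
  else if PySem.Chars.isspace ch then
    (out, tok, if tok ≠ [] then pend ++ [ch] else pend)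
  else
    (out, tok ++ pend ++ [ch], [])

def expand_repeated_py_alt (vals : Option (List String)) : Option (List String) :=
  match vals with
  | none => none
  | some vs =>
    if vs.isEmpty then none
    else
      some (vs.foldl (fun out v =>
        let st := v.toList.foldl tokStep (out, [], [])
        if st.2.1 ≠ [] then st.1 ++ [String.ofList st.2.1] else st.1) [])

-- ===== PRECONDITION & SPEC =====
def Spec_expand_repeated_py (vals : Option (List String)) (out : Option (List String)) : Prop := out = expand_repeated_py_alt vals
instance (vals : Option (List String)) (out : Option (List String)) : Decidable (Spec_expand_repeated_py vals out) := by unfold Spec_expand_repeated_py; infer_instance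

-- ===== CLAIM (what is proved, stated in full; the proofs are below) =====
def Claim_equal_expand_repeated_py : Prop := ∀ (vals : Option (List String)), Dom_expand_repeated_py vals → Spec_expand_repeated_py vals (expand_repeated_py vals)

-- ===== LEMMAS AND PROOFS =====

-- structural specification of splitting a character list at commas
def splitCommaSpec : List Char → List (List Char)
  | [] => [[]]
  | c :: rest =>
    if c = ',' then [] :: splitCommaSpec rest
    else
      match splitCommaSpec rest with
      | p :: ps => (c :: p) :: ps
      | [] => [[c]]

theorem splitCommaSpec_ne_nil (l : List Char) : splitCommaSpec l ≠ [] := by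
  cases l with
  | nil => simp [splitCommaSpec]
  | cons c rest =>
    simp only [splitCommaSpec]
    split_ifs
    · simp
    · cases splitCommaSpec rest <;> simp

theorem splitOn_go_comma (fuel : Nat) (l cur : List Char) (acc : List (List Char))
    (h : l.length < fuel) :
    PySem.Chars.splitOn.go [','] fuel l cur acc
      = acc.reverse ++ (splitCommaSpec l).modifyHead (cur.reverse ++ ·) := by
  induction fuel generalizing l cur acc with
  | zero => omega
  | succ fuel ih =>
    cases l with
    | nil => simp [PySem.Chars.splitOn.go, splitCommaSpec]
    | cons c rest =>
      by_cases hc : c = ','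
      · subst hc
        have hpre : List.isPrefixOf [','] (',' :: rest) = true := by simp [List.isPrefixOf]
        rw [PySem.Chars.splitOn.go, if_pos hpre]
        simp only [List.length_cons] at h
        simp only [List.length_singleton, List.drop_succ_cons, List.drop_zero]
        rw [ih rest [] (cur.reverse :: acc) (by omega)]
        simp only [splitCommaSpec, if_true]
        cases hs : splitCommaSpec rest with
        | nil => exact absurd hs (splitCommaSpec_ne_nil rest)
        | cons p ps => simp
      · have hpre : List.isPrefixOf [','] (c :: rest) = false := by
          simp only [List.isPrefixOf, Bool.and_true, beq_eq_false_iff_ne, ne_eq]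
          exact fun h' => hc h'.symm
        rw [PySem.Chars.splitOn.go, if_neg (by simp [hpre])]
        simp only [List.length_cons] at h
        rw [ih rest (c :: cur) acc (by omega)]
        simp only [splitCommaSpec, if_neg hc]
        cases hs : splitCommaSpec rest with
        | nil => exact absurd hs (splitCommaSpec_ne_nil rest)
        | cons p ps => simp

theorem splitOn_comma (l : List Char) :
    PySem.Chars.splitOn l [','] = splitCommaSpec l := by
  rw [PySem.Chars.splitOn, splitOn_go_comma l.length.succ l [] [] (by omega)]
  cases hs : splitCommaSpec l with
  | nil => exact absurd hs (splitCommaSpec_ne_nil l)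
  | cons p ps => simp

-- A's inner accumulate-if loop is a strip-map plus a filter (PySem.List.foldl_append_if)
theorem foldl_strip_filter (L : List String) (acc : List String) :
    L.foldl (fun out t =>
        let t' := PySem.Str.strip t
        if t' ≠ "" then out ++ [t'] else out) acc
      = acc ++ (L.map PySem.Str.strip).filter (fun s => s ≠ "") := by
  have h := PySem.List.foldl_append_if (fun t => decide (PySem.Str.strip t ≠ ""))
      PySem.Str.strip L acc
  simp only [decide_eq_true_eq] at h
  rw [h, List.filter_map]
  rfl

-- strip of an all-whitespace-prefixed list drops the prefix
theorem strip_space_prefix (ws x : List Char) (h : ∀ c ∈ ws, PySem.Chars.isspace c = true) :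
    PySem.Chars.strip (ws ++ x) = PySem.Chars.strip x := by
  unfold PySem.Chars.strip PySem.Chars.lstrip
  rw [List.dropWhile_append]
  have : List.dropWhile PySem.Chars.isspace ws = [] := List.dropWhile_eq_nil_iff.2 h
  simp [this]

-- strip of token ++ pending-whitespace is the token, when the token starts and ends non-space
theorem dropWhile_eq_self_of_head (p : Char → Bool) (l : List Char)
    (h : ∀ d, l.head? = some d → p d = false) : List.dropWhile p l = l := by
  cases l with
  | nil => rfl
  | cons a t => rw [List.dropWhile_cons_of_neg (by simp [h a rfl])]

theorem dropWhile_eq_nil_of_all (p : Char → Bool) (l : List Char)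
    (h : ∀ c ∈ l, p c = true) : List.dropWhile p l = [] :=
  List.dropWhile_eq_nil_iff.2 (fun c hc => h c hc)

theorem strip_tok_pend (tok pend : List Char)
    (hh : ∀ d, tok.head? = some d → PySem.Chars.isspace d = false)
    (hl : ∀ d, tok.getLast? = some d → PySem.Chars.isspace d = false)
    (hp : ∀ c ∈ pend, PySem.Chars.isspace c = true) :
    PySem.Chars.strip (tok ++ pend) = tok := by
  cases tok with
  | nil =>
    simp only [List.nil_append, PySem.Chars.strip, PySem.Chars.lstrip, PySem.Chars.rstrip]
    rw [dropWhile_eq_nil_of_all _ _ hp]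
    rfl
  | cons a t =>
    have ha : PySem.Chars.isspace a = false := hh a rfl
    simp only [PySem.Chars.strip, PySem.Chars.lstrip, PySem.Chars.rstrip]
    rw [List.cons_append, List.dropWhile_cons_of_neg (by simp [ha]),
      List.reverse_cons, List.reverse_append, List.append_assoc, List.dropWhile_append,
      dropWhile_eq_nil_of_all _ _ (by intro c hc; exact hp c (List.mem_reverse.1 hc))]
    simp only [List.isEmpty_nil, if_true]
    rw [dropWhile_eq_self_of_head]
    · simp
    · intro d hd
      rcases List.eq_nil_or_concat t with ht | ⟨u, b, rfl⟩
      · subst ht; simp at hd; subst hd; exact ha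
      · have hdb : b = d := by simpa [List.concat_eq_append] using hd
        subst hdb
        apply hl
        have he : a :: u.concat b = (a :: u) ++ [b] := by simp [List.concat_eq_append]
        rw [he, List.getLast?_append]
        rfl

-- invariant on B's scanner state
def TokInv (tok pend : List Char) : Prop :=
  (',' ∉ tok) ∧ (∀ c ∈ pend, PySem.Chars.isspace c = true) ∧ (tok = [] → pend = []) ∧
  (∀ d, tok.head? = some d → PySem.Chars.isspace d = false) ∧
  (∀ d, tok.getLast? = some d → PySem.Chars.isspace d = false)

-- B's scan of l from state (out, tok, pend), then flush, equals A's strip/filter of the pieces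
def flushSt (st : List String × List Char × List Char) : List String :=
  if st.2.1 ≠ [] then st.1 ++ [String.ofList st.2.1] else st.1

theorem tokStep_comma (out : List String) (tok pend : List Char) :
    tokStep (out, tok, pend) ','
      = ((if tok ≠ [] then out ++ [String.ofList tok] else out), [], []) := by
  simp [tokStep]

theorem tokStep_space (out : List String) (tok pend : List Char) (c : Char)
    (hc : c ≠ ',') (hs : PySem.Chars.isspace c = true) :
    tokStep (out, tok, pend) c = (out, tok, if tok ≠ [] then pend ++ [c] else pend) := by
  simp [tokStep, hc, hs]

theorem tokStep_char (out : List String) (tok pend : List Char) (c : Char)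
    (hc : c ≠ ',') (hs : PySem.Chars.isspace c = false) :
    tokStep (out, tok, pend) c = (out, tok ++ pend ++ [c], []) := by
  simp [tokStep, hc, hs]

theorem ofList_ne_empty_iff (l : List Char) : (String.ofList l ≠ "") ↔ l ≠ [] := by
  constructor
  · intro h hl; subst hl; exact h rfl
  · intro h he
    apply h
    have := congrArg String.toList he
    simpa using this

theorem TokInv_nil : TokInv [] [] := by
  refine ⟨by simp, by simp, fun _ => rfl, by simp, by simp⟩

theorem splitCommaSpec_comma (rest : List Char) :
    splitCommaSpec (',' :: rest) = [] :: splitCommaSpec rest := by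
  simp [splitCommaSpec]

theorem splitCommaSpec_cons_ne (c : Char) (rest p : List Char) (ps : List (List Char))
    (hc : c ≠ ',') (hs : splitCommaSpec rest = p :: ps) :
    splitCommaSpec (c :: rest) = (c :: p) :: ps := by
  simp [splitCommaSpec, hc, hs]

theorem modifyHead_triv (l : List (List Char)) : l.modifyHead (fun p => p) = l := by
  cases l <;> rfl

theorem scan_eq (l : List Char) : ∀ tok pend out, TokInv tok pend →
    flushSt (l.foldl tokStep (out, tok, pend))
      = out ++ (((splitCommaSpec l).modifyHead (fun p => tok ++ pend ++ p)).map
          (fun p => String.ofList (PySem.Chars.strip p))).filter (fun s => s ≠ "") := by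
  induction l with
  | nil =>
    intro tok pend out hinv
    obtain ⟨hnc, hp, hep, hh, hl⟩ := hinv
    simp only [List.foldl_nil, splitCommaSpec, List.modifyHead, List.map_cons, List.map_nil,
      List.append_nil, flushSt]
    rw [strip_tok_pend tok pend hh hl hp]
    by_cases ht : tok = []
    · subst ht; simp
    · rw [if_pos ht, List.filter_cons, if_pos (by simpa [ofList_ne_empty_iff] using ht)]
      simp
  | cons c rest ih =>
    intro tok pend out hinv
    obtain ⟨hnc, hp, hep, hh, hl⟩ := hinv
    by_cases hc : c = ','
    · subst hc
      rw [List.foldl_cons, tokStep_comma, ih [] [] _ TokInv_nil, splitCommaSpec_comma]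
      simp only [List.modifyHead_cons, List.map_cons, List.filter_cons, List.nil_append,
        List.append_nil]
      rw [modifyHead_triv, strip_tok_pend tok pend hh hl hp]
      by_cases ht : tok = []
      · subst ht; simp
      · rw [if_pos ht, if_pos (by simpa [ofList_ne_empty_iff] using ht)]
        simp
    · cases hs : splitCommaSpec rest with
      | nil => exact absurd hs (splitCommaSpec_ne_nil rest)
      | cons p ps =>
        by_cases hsp : PySem.Chars.isspace c = true
        · -- whitespace character
          rw [List.foldl_cons, tokStep_space _ _ _ _ hc hsp]
          by_cases ht : tok = []
          · -- token empty: pend unchanged, and by the invariant pend = []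
            have hpe : pend = [] := hep ht
            subst ht; subst hpe
            rw [if_neg (by simp), ih [] [] _ TokInv_nil,
              splitCommaSpec_cons_ne c rest p ps hc hs, hs]
            simp only [List.modifyHead_cons, List.map_cons, List.nil_append]
            have hst := strip_space_prefix [c] p
              (by intro d hd; simp at hd; subst hd; exact hsp)
            simp only [List.singleton_append] at hst
            rw [hst]
          · rw [if_pos ht]
            have hp' : ∀ d ∈ pend ++ [c], PySem.Chars.isspace d = true := by
              intro d hd
              rcases List.mem_append.1 hd with h1 | h1
              · exact hp d h1
              · simp at h1; subst h1; exact hsp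
            rw [ih tok (pend ++ [c]) _ ⟨hnc, hp', fun h => absurd h ht, hh, hl⟩,
              splitCommaSpec_cons_ne c rest p ps hc hs, hs]
            simp only [List.modifyHead_cons, List.map_cons]
            have hq : tok ++ (pend ++ [c]) ++ p = tok ++ pend ++ c :: p := by simp
            rw [hq]
        · -- ordinary character: it is appended to the token
          have hsp' : PySem.Chars.isspace c = false := by
            cases h : PySem.Chars.isspace c
            · rfl
            · exact absurd h hsp
          rw [List.foldl_cons, tokStep_char _ _ _ _ hc hsp']
          have hinv' : TokInv (tok ++ pend ++ [c]) [] := by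
            have hcomma : ',' ∉ tok ++ pend ++ [c] := by
              intro hmem
              rcases List.mem_append.1 hmem with h1 | h1
              · rcases List.mem_append.1 h1 with h2 | h2
                · exact hnc h2
                · have hws := hp _ h2
                  simp [PySem.Chars.isspace] at hws
              · simp at h1; exact hc h1.symm
            have hhead : ∀ d, (tok ++ pend ++ [c]).head? = some d →
                PySem.Chars.isspace d = false := by
              intro d hd
              by_cases ht : tok = []
              · have hpe : pend = [] := hep ht
                subst ht; subst hpe
                simp at hd; subst hd; exact hsp'
              · cases tok with
                | nil => exact absurd rfl ht
                | cons a t =>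
                  simp only [List.cons_append, List.head?_cons, Option.some.injEq] at hd
                  subst hd; exact hh a rfl
            have hlast : ∀ d, (tok ++ pend ++ [c]).getLast? = some d →
                PySem.Chars.isspace d = false := by
              intro d hd
              have hcl : (tok ++ pend ++ [c]).getLast? = some c := by simp
              rw [hcl] at hd
              injection hd with hd; subst hd; exact hsp'
            exact ⟨hcomma, by simp, by simp, hhead, hlast⟩
          rw [ih (tok ++ pend ++ [c]) [] _ hinv',
            splitCommaSpec_cons_ne c rest p ps hc hs, hs]
          simp only [List.modifyHead_cons, List.map_cons]
          have hq : tok ++ pend ++ [c] ++ [] ++ p = tok ++ pend ++ c :: p := by simp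
          rw [hq]

-- Str.strip on an ofList piece, at the list level
theorem strip_ofList (p : List Char) :
    PySem.Str.strip (String.ofList p) = String.ofList (PySem.Chars.strip p) := by
  apply String.toList_inj.mp
  simp [PySem.Str.toList_strip]

-- the two per-value inner loops agree from any accumulator
theorem inner_eq (v : String) (out : List String) :
    (let st := v.toList.foldl tokStep (out, [], [])
     if st.2.1 ≠ [] then st.1 ++ [String.ofList st.2.1] else st.1)
      = (pySplitComma v).foldl (fun out t =>
          let t' := PySem.Str.strip t
          if t' ≠ "" then out ++ [t'] else out) out := by
  show flushSt (v.toList.foldl tokStep (out, [], [])) = _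
  rw [foldl_strip_filter, scan_eq v.toList [] [] out TokInv_nil]
  simp only [List.nil_append]
  rw [modifyHead_triv]
  unfold pySplitComma
  rw [splitOn_comma, List.map_map]
  congr 1
  congr 1
  apply List.map_congr_left
  intro p _
  exact (strip_ofList p).symm

-- ===== VERDICT (by name: the statement is the Claim_ definition above) =====
theorem expand_repeated_py_spec : Claim_equal_expand_repeated_py := by
  intro vals _
  unfold Spec_expand_repeated_py expand_repeated_py expand_repeated_py_alt
  cases vals with
  | none => rfl
  | some vs =>
    by_cases he : vs.isEmpty
    · simp [he]
    · simp only [he, if_false, Bool.false_eq_true]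
      have hfun : (fun (out : List String) (v : String) =>
            let st := v.toList.foldl tokStep (out, [], [])
            if st.2.1 ≠ [] then st.1 ++ [String.ofList st.2.1] else st.1)
          = (fun (out : List String) (v : String) =>
            (pySplitComma v).foldl (fun out t =>
              let t' := PySem.Str.strip t
              if t' ≠ "" then out ++ [t'] else out) out) := by
        funext out v
        exact inner_eq v out
      rw [hfun]
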